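-- pv_equiv track=rewrite | github.com/otvin/compiler | asm_funcs.py | codeToASMComment
-- ===== SOURCE A (Python) =====
-- def codeToASMComment(code):
-- 	# takes a block of code and converts it to a comment that can be added to the line in the assembly
-- 	# remove newlines
-- 	c = code.replace('\n','')
-- 	c = c.replace('\t','')
-- 	# remove comments
-- 	i = 0
-- 	c2 = ''
-- 	while i < len(c):
-- 		while c[i] != '{':
-- 			c2 += c[i]
-- 			i += 1
-- 			if i >= len(c):
-- 				return c2
-- 		while c[i] != '}':
-- 			i += 1
-- 			if i >= len(c):
-- 				return c2
-- 		if c[i] == '}':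
-- 			i += 1
-- 			if i >= len(c):
-- 				return c2
-- 	return c2
-- ===== SOURCE B (Python) =====
-- def codeToASMComment(code):
--     # Staged: split on '{'; keep the head part whole; for every later part keep
--     # only what follows its first '}' (a part with no '}' is swallowed entirely,
--     # which reproduces A's skip continuing across an inner '{').
--     parts = code.replace('\n', '').replace('\t', '').split('{')
--     pieces = [parts[0]]
--     for p in parts[1:]:
--         j = p.find('}')
--         if j != -1:
--             pieces.append(p[j + 1:])
--     return ''.join(pieces)
-- ===== Notes on version B (the rewrite author's own statement) =====
-- stated objective: faster
-- what changed: Replaces A's stateful nested-while character scanner with quadratic c2 += string concatenation by staged passes: split the cleaned string on '{', keep the head part whole, and for each later part keep only the text after its first '}' (parts without '}' are swallowed, matching A's skip running across inner braces), then join once.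
import Mathlib
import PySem

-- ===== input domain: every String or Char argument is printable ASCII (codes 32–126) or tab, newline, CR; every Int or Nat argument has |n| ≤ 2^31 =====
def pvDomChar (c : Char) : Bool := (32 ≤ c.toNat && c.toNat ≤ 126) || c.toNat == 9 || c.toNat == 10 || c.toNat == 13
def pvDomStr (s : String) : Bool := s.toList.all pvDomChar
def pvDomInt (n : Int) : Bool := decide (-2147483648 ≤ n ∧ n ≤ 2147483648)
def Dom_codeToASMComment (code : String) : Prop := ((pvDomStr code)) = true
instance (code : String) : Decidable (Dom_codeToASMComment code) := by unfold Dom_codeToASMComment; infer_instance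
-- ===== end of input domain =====

-- B replaces A's stateful nested-while scanner by staged passes: split on '{', keep the
-- head part whole and, of every later part, only the text after its first '}' (objective:
-- alternative decomposition).

-- ===== PORT A =====
-- A's outer loop with the first inner while: copy chars until '{' (early return when the
-- string is exhausted).  The second inner while (skip until '}') is pACSkip; the initial
-- check of that loop at the '{' itself always fails ('{' ≠ '}') and Python increments i,
-- so pACopy passes the rest of the list to pACSkip.  c2 is built by string push, as in A.
mutual
def pACopy : List Char → List Char → List Char
  | [], acc => acc
  | c :: rest, acc =>
    if c = '{' then pACSkip rest acc
    else pACopy rest (acc ++ [c])   -- c2 += c[i]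
def pACSkip : List Char → List Char → List Char
  | [], acc => acc
  | c :: rest, acc =>
    if c = '}' then pACopy rest acc   -- then 'if c[i] == "}"': i += 1, back to the outer loop
    else pACSkip rest acc
end

-- the two reassignments c = code.replace('\n',''); c = c.replace('\t','') are composed
def codeToASMComment (code : String) : String :=
  String.ofList (pACopy (PySem.Str.replace (PySem.Str.replace code "\n" "") "\t" "").toList [])

-- ===== PORT B =====
-- loop body of Source B: j = p.find('}'); if j != -1: pieces.append(p[j+1:])  (j inlined)
def bKeep (pieces : List (List Char)) (p : List Char) : List (List Char) :=
  if PySem.Chars.find p ['}'] ≠ -1 then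
    pieces ++ [PySem.Chars.slice p (some (PySem.Chars.find p ['}'] + 1)) none]
  else pieces

-- parts = …split('{') (List.splitOn = Python split for a 1-char separator; never []),
-- pieces = [parts[0]] extended by the loop, then ''.join(pieces)
def codeToASMComment_alt (code : String) : String :=
  match (PySem.Str.replace (PySem.Str.replace code "\n" "") "\t" "").toList.splitOn '{' with
  | [] => ""
  | p0 :: rest => String.ofList (PySem.Chars.join [] (rest.foldl bKeep [p0]))

-- ===== PRECONDITION & SPEC =====
def Spec_codeToASMComment (code : String) (out : String) : Prop := out = codeToASMComment_alt code
instance (code : String) (out : String) : Decidable (Spec_codeToASMComment code out) := by unfold Spec_codeToASMComment; infer_instance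

-- ===== CLAIM (what is proved, stated in full; the proofs are below) =====
def Claim_equal_codeToASMComment : Prop := ∀ (code : String), Dom_codeToASMComment code → Spec_codeToASMComment code (codeToASMComment code)

-- ===== LEMMAS AND PROOFS =====

theorem findGo_cons (c : Char) (t : List Char) (k : Nat) :
    PySem.Chars.find.go ['}'] (c :: t) k =
      if c = '}' then (k : Int) else PySem.Chars.find.go ['}'] t (k + 1) := by
  by_cases h : c = '}' <;>
    simp [PySem.Chars.find.go, List.isPrefixOf, h, eq_comm (a := '}')]

theorem findGo_nil (k : Nat) : PySem.Chars.find.go ['}'] [] k = -1 := by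
  simp [PySem.Chars.find.go]

theorem findGo_nonneg (t : List Char) : ∀ k : Nat,
    PySem.Chars.find.go ['}'] t k = -1 ∨ (k : Int) ≤ PySem.Chars.find.go ['}'] t k := by
  induction t with
  | nil => intro k; simp [findGo_nil]
  | cons c r ih =>
    intro k
    rw [findGo_cons]
    by_cases h : c = '}'
    · simp [h]
    · rw [if_neg h]
      rcases ih (k + 1) with h1 | h1
      · exact Or.inl h1
      · right
        have h2 : ((k : Nat) : Int) + 1 ≤ PySem.Chars.find.go ['}'] r (k + 1) := by
          push_cast at h1; omega
        omega


theorem findGo_shift (t : List Char) : ∀ k : Nat,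
    PySem.Chars.find.go ['}'] t k =
      if PySem.Chars.find.go ['}'] t 0 = -1 then -1 else PySem.Chars.find.go ['}'] t 0 + k := by
  induction t with
  | nil => intro k; simp [findGo_nil]
  | cons c r ih =>
    intro k
    rw [findGo_cons, findGo_cons]
    by_cases h : c = '}'
    · simp [h]
    · rw [if_neg h, if_neg h, ih (k + 1), ih 1]
      rcases findGo_nonneg r 0 with h1 | h1
      · simp [h1]
      · have h2 : PySem.Chars.find.go ['}'] r 0 + 1 ≠ -1 := by omega
        have h3 : PySem.Chars.find.go ['}'] r 0 ≠ -1 := by omega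
        have h4 : ¬ (PySem.Chars.find.go ['}'] r 0 + ((1 : Nat) : Int) = -1) := by
          push_cast; omega
        simp only [if_neg h3, if_neg h4]
        push_cast
        ring
def gKeep (p : List Char) : List Char :=
  if PySem.Chars.find p ['}'] ≠ -1 then
    PySem.Chars.slice p (some (PySem.Chars.find p ['}'] + 1)) none
  else []

theorem gKeep_cons_ne (c : Char) (h : List Char) (hc : c ≠ '}') :
    gKeep (c :: h) = gKeep h := by
  unfold gKeep
  rw [show PySem.Chars.find (c :: h) ['}'] = PySem.Chars.find.go ['}'] (c :: h) 0 from rfl,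
      findGo_cons, if_neg hc, findGo_shift h 1,
      show PySem.Chars.find h ['}'] = PySem.Chars.find.go ['}'] h 0 from rfl]
  rcases findGo_nonneg h 0 with h0 | h0
  · simp [h0]
  · obtain ⟨n, hn⟩ := Int.eq_ofNat_of_zero_le (by exact_mod_cast h0)
    have hne : PySem.Chars.find.go ['}'] h 0 ≠ -1 := by omega
    rw [if_neg hne, hn]
    push_cast
    rw [if_pos (by omega : ¬ ((n : Int) + 1 = -1)),
        if_pos (by omega : ¬ ((n : Int) = -1)),
        show ((n : Int) + 1 + 1) = ((n + 2 : Nat) : Int) by push_cast; ring,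
        show ((n : Int) + 1) = ((n + 1 : Nat) : Int) by push_cast; ring,
        PySem.Chars.slice_eq_listSlice, PySem.Chars.slice_eq_listSlice,
        PySem.List.slice_from_natCast, PySem.List.slice_from_natCast]
    simp [List.drop]

theorem gKeep_close (h : List Char) : gKeep ('}' :: h) = h := by
  unfold gKeep
  rw [show PySem.Chars.find ('}' :: h) ['}'] = PySem.Chars.find.go ['}'] ('}' :: h) 0 from rfl,
      findGo_cons, if_pos rfl, if_pos (by omega : ¬ ((0 : Nat) : Int) = -1),
      show (((0 : Nat) : Int) + 1) = ((1 : Nat) : Int) by norm_num,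
      PySem.Chars.slice_eq_listSlice, PySem.List.slice_from_natCast]
  simp

theorem gKeep_nil : gKeep [] = [] := by
  unfold gKeep
  simp [PySem.Chars.find, findGo_nil]

-- proof-side value of B: head part whole, later parts contribute gKeep
def bSpec (cs : List Char) : List Char :=
  match cs.splitOn '{' with
  | [] => []
  | p0 :: rest => p0 ++ rest.flatMap gKeep

theorem splitOn_cons (c : Char) (t : List Char) :
    (c :: t).splitOn '{' =
      if c = '{' then [] :: t.splitOn '{' else (t.splitOn '{').modifyHead (List.cons c) := by
  simp [List.splitOn, List.splitOnP_cons]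

theorem pA_eq_bSpec (cs : List Char) : ∀ acc : List Char,
    pACopy cs acc = acc ++ bSpec cs ∧
    pACSkip cs acc = acc ++ (cs.splitOn '{').flatMap gKeep := by
  induction cs with
  | nil =>
    intro acc
    constructor
    · simp [pACopy, bSpec, List.splitOn, List.splitOnP_nil]
    · simp [pACSkip, List.splitOn, List.splitOnP_nil, gKeep_nil]
  | cons c t ih =>
    intro acc
    obtain ⟨q0, qs, hq⟩ := List.exists_cons_of_ne_nil (List.splitOnP_ne_nil (· == '{') t)
    have hqsplit : t.splitOn '{' = q0 :: qs := hq
    constructor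
    · by_cases h : c = '{'
      · rw [show pACopy (c :: t) acc = pACSkip t acc by simp [pACopy, h], (ih acc).2]
        simp [bSpec, splitOn_cons, h]
      · rw [show pACopy (c :: t) acc = pACopy t (acc ++ [c]) by simp [pACopy, h],
            (ih (acc ++ [c])).1]
        simp [bSpec, splitOn_cons, h, hqsplit]
    · by_cases h : c = '}'
      · rw [show pACSkip (c :: t) acc = pACopy t acc by simp [pACSkip, h], (ih acc).1]
        simp [bSpec, splitOn_cons, hqsplit, h, gKeep_close]
      · rw [show pACSkip (c :: t) acc = pACSkip t acc by simp [pACSkip, h], (ih acc).2]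
        by_cases h2 : c = '{'
        · simp [splitOn_cons, h2, gKeep_nil]
        · simp [splitOn_cons, h2, hqsplit, gKeep_cons_ne c q0 h]

theorem joinNil_flatten : ∀ L : List (List Char), PySem.Chars.join [] L = L.flatten
  | [] => by simp [PySem.Chars.join_nil]
  | [a] => by simp [PySem.Chars.join_singleton]
  | a :: b :: l => by
      rw [PySem.Chars.join_cons_cons, joinNil_flatten (b :: l)]; simp

theorem join_foldl_bKeep (rest : List (List Char)) : ∀ init : List (List Char),
    PySem.Chars.join [] (rest.foldl bKeep init) =
      PySem.Chars.join [] init ++ rest.flatMap gKeep := by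
  induction rest with
  | nil => intro init; simp
  | cons p r ih =>
    intro init
    rw [List.foldl_cons, ih (bKeep init p)]
    unfold bKeep
    rw [List.flatMap_cons]
    unfold gKeep
    split_ifs with h
    · rw [joinNil_flatten, joinNil_flatten, List.flatten_append]
      simp
    · simp

theorem alt_eq_bSpec (cs : List Char) :
    (match cs.splitOn '{' with
     | [] => ""
     | p0 :: rest => String.ofList (PySem.Chars.join [] (rest.foldl bKeep [p0]))) =
    String.ofList (bSpec cs) := by
  obtain ⟨q0, qs, hq⟩ := List.exists_cons_of_ne_nil (List.splitOnP_ne_nil (· == '{') cs)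
  have hsplit : cs.splitOn '{' = q0 :: qs := hq
  rw [show cs.splitOn '{' = q0 :: qs from hsplit]
  simp only [bSpec, hsplit]
  rw [join_foldl_bKeep, joinNil_flatten]
  simp

-- ===== VERDICT (by name: the statement is the Claim_ definition above) =====
theorem codeToASMComment_spec : Claim_equal_codeToASMComment := by
  intro code _
  show codeToASMComment code = codeToASMComment_alt code
  unfold codeToASMComment codeToASMComment_alt
  generalize (PySem.Str.replace (PySem.Str.replace code "\n" "") "\t" "").toList = L
  rw [(pA_eq_bSpec L []).1, List.nil_append]
  exact (alt_eq_bSpec L).symm
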